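-- pv_equiv track=rewrite | github.com/Kenny-Korea/CodingTest | public/section02/*07.py | solution
-- ===== SOURCE A (Python) =====
-- def is_peak(i: int, j: int, arr: list[list[int]]) -> bool:
--   rows, cols = len(arr), len(arr[0])
--   dx = [0, 0, -1, 1]
--   dy = [-1, 1, 0, 0]
--
--   for k in range(4):
--     ni, nj = i + dx[k], j + dy[k]
--     if 0 <= ni < rows and 0 <= nj < cols:
--       if arr[ni][nj] > arr[i][j]:
--         return False
--
--   return True
--
-- def solution(arr: list[list[int]]) -> int:
--   lx = len(arr[0])
--   ly = len(arr)
--   answer = 0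
--
--   for i in range(ly):
--     for j in range(lx):
--       if is_peak(i, j, arr):
--         answer += 1
--
--   return answer
-- ===== SOURCE B (Python) =====
-- def solution(arr: list[list[int]]) -> int:
--     rows, cols = len(arr), len(arr[0])
--     bad = set()
--     for i in range(rows):
--         for j in range(cols - 1):
--             a, b = arr[i][j], arr[i][j + 1]
--             if a < b:
--                 bad.add((i, j))
--             elif b < a:
--                 bad.add((i, j + 1))
--     for i in range(rows - 1):
--         for j in range(cols):
--             a, b = arr[i][j], arr[i + 1][j]
--             if a < b:
--                 bad.add((i, j))
--             elif b < a:
--                 bad.add((i + 1, j))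
--     return rows * cols - len(bad)
-- ===== Notes on version B (the rewrite author's own statement) =====
-- stated objective: alternative
-- what changed: Replaces A's per-cell scan of all 4 neighbours by a single pass over adjacent cell pairs that collects each pair's strictly smaller cell into a 'disqualified' set, returning rows*cols - len(set).
import Mathlib
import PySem

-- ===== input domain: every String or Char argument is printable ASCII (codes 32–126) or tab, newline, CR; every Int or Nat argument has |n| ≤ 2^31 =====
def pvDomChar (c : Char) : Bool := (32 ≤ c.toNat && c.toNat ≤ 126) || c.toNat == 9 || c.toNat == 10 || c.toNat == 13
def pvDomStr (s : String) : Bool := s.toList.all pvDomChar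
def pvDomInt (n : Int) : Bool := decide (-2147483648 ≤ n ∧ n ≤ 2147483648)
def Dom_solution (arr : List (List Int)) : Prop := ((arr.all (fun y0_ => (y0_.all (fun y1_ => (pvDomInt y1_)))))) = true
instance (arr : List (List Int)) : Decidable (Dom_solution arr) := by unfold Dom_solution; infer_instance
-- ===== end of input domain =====

-- B replaces A's per-cell 4-neighbour scan by a single pass over adjacent cell pairs that collects the
-- strictly smaller cell of each pair in a 'disqualified' set, returning rows*cols - len(set) (alternative
-- decomposition, same O(rows*cols) cost). Equality of the RETURN value is proved on Pre_ (A raises elsewhere).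

-- ===== PORT A =====
-- total stand-in for arr[i][j]: exact whenever 0 ≤ i < len(arr) and 0 ≤ j < len(arr[i]) — the only
-- accesses either port makes inside Pre_solution
def pvIdx (arr : List (List Int)) (i j : Int) : Int :=
  PySem.List.pyGetD (PySem.List.pyGetD arr i []) j 0

def is_peak (i j : Int) (arr : List (List Int)) : Bool :=
  let rows : Int := arr.length
  let cols : Int := (arr.headD []).length
  let dx : List Int := [0, 0, -1, 1]
  let dy : List Int := [-1, 1, 0, 0]
  (PySem.List.pyRange 0 4 1).all (fun k =>
    let ni := i + PySem.List.pyGetD dx k 0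
    let nj := j + PySem.List.pyGetD dy k 0
    !(decide (0 ≤ ni ∧ ni < rows ∧ 0 ≤ nj ∧ nj < cols) &&
      decide (pvIdx arr ni nj > pvIdx arr i j)))

def solution (arr : List (List Int)) : Int :=
  let lx : Int := (arr.headD []).length
  let ly : Int := arr.length
  (PySem.List.pyRange 0 ly 1).foldl (fun answer i =>
    (PySem.List.pyRange 0 lx 1).foldl (fun answer j =>
      if is_peak i j arr then answer + 1 else answer) answer) 0

-- ===== PORT B =====
def solution_alt (arr : List (List Int)) : Int :=
  let rows : Int := arr.length
  let cols : Int := (arr.headD []).length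
  let bad0 : PySem.Set (Int × Int) := PySem.Set.empty
  let bad1 := (PySem.List.pyRange 0 rows 1).foldl (fun bad i =>
    (PySem.List.pyRange 0 (cols - 1) 1).foldl (fun bad j =>
      let a := pvIdx arr i j
      let b := pvIdx arr i (j + 1)
      if a < b then PySem.Set.add bad (i, j)
      else if b < a then PySem.Set.add bad (i, j + 1)
      else bad) bad) bad0
  let bad2 := (PySem.List.pyRange 0 (rows - 1) 1).foldl (fun bad i =>
    (PySem.List.pyRange 0 cols 1).foldl (fun bad j =>
      let a := pvIdx arr i j
      let b := pvIdx arr (i + 1) j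
      if a < b then PySem.Set.add bad (i, j)
      else if b < a then PySem.Set.add bad (i + 1, j)
      else bad) bad) bad1
  rows * cols - PySem.Set.len bad2

-- ===== PRECONDITION & SPEC =====
-- Pre_ is exactly where the Python A returns: a nonempty grid whose every row has at least
-- len(arr[0]) entries (on the empty list and on shorter rows A raises IndexError).
def Pre_solution (arr : List (List Int)) : Prop :=
  arr ≠ [] ∧ ∀ row ∈ arr, (arr.headD []).length ≤ row.length
instance (arr : List (List Int)) : Decidable (Pre_solution arr) := by unfold Pre_solution; infer_instance
def pvWitness_solution : List (List Int) := [[1, 2], [3, 0]]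

def Spec_solution (arr : List (List Int)) (out : Int) : Prop := out = solution_alt arr
instance (arr : List (List Int)) (out : Int) : Decidable (Spec_solution arr out) := by unfold Spec_solution; infer_instance

-- ===== CLAIM (what is proved, stated in full; the proofs are below) =====
def Claim_equal_solution : Prop := ∀ (arr : List (List Int)), Dom_solution arr → Pre_solution arr → Spec_solution arr (solution arr)

-- ===== LEMMAS AND PROOFS =====

-- "cell p has a strictly greater 4-neighbour inside the rows×cols grid" (values read through pvIdx)
def pvNp (arr : List (List Int)) (rows cols : Int) (p : Int × Int) : Bool :=
  decide ((p.2 + 1 < cols ∧ pvIdx arr p.1 p.2 < pvIdx arr p.1 (p.2 + 1)) ∨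
          (0 < p.2 ∧ pvIdx arr p.1 p.2 < pvIdx arr p.1 (p.2 - 1)) ∨
          (p.1 + 1 < rows ∧ pvIdx arr p.1 p.2 < pvIdx arr (p.1 + 1) p.2) ∨
          (0 < p.1 ∧ pvIdx arr p.1 p.2 < pvIdx arr (p.1 - 1) p.2))

lemma pv_mem_foldl_step {β : Type} (f : PySem.Set (Int × Int) → β → PySem.Set (Int × Int))
    (Q : β → (Int × Int) → Prop)
    (hf : ∀ s b y, y ∈ f s b ↔ y ∈ s ∨ Q b y) :
    ∀ (l : List β) (s : PySem.Set (Int × Int)) (y : Int × Int),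
      y ∈ l.foldl f s ↔ y ∈ s ∨ ∃ b ∈ l, Q b y := by
  intro l
  induction l with
  | nil => simp
  | cons x xs ih =>
    intro s y
    rw [List.foldl_cons, ih, hf]
    simp only [List.mem_cons]
    constructor
    · rintro ((h | h) | ⟨b, hb, h⟩)
      exacts [Or.inl h, Or.inr ⟨x, Or.inl rfl, h⟩, Or.inr ⟨b, Or.inr hb, h⟩]
    · rintro (h | ⟨b, (rfl | hb), h⟩)
      exacts [Or.inl (Or.inl h), Or.inl (Or.inr h), Or.inr ⟨b, hb, h⟩]

lemma pv_nodup_foldl_step {β : Type} (f : PySem.Set (Int × Int) → β → PySem.Set (Int × Int))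
    (hf : ∀ s b, List.Nodup s → List.Nodup (f s b)) :
    ∀ (l : List β) (s : PySem.Set (Int × Int)), List.Nodup s → List.Nodup (l.foldl f s) := by
  intro l
  induction l with
  | nil => intro s h; exact h
  | cons x xs ih => intro s h; exact ih _ (hf s x h)

lemma pv_countP_not (l : List (Int × Int)) (p : (Int × Int) → Bool) :
    l.countP p + l.countP (fun x => !(p x)) = l.length := by
  induction l with
  | nil => rfl
  | cons x xs ih => by_cases h : p x <;> simp [h] <;> omega

lemma pv_sum_countP_product (q : Int → Int → Bool) (ys : List Int) :
    ∀ (l : List Int),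
      ((l.map (fun i => ((ys.countP (q i) : Nat) : Int))).sum) =
        (((l ×ˢ ys).countP (fun p => q p.1 p.2) : Nat) : Int) := by
  intro l
  induction l with
  | nil => simp
  | cons x xs ih =>
    rw [List.map_cons, List.sum_cons, ih, List.product_cons, List.countP_append]
    have h : List.countP (fun p => q p.1 p.2) (ys.map (fun b => (x, b))) = ys.countP (q x) := by
      rw [List.countP_map]; rfl
    rw [h]; push_cast; ring

lemma pv_is_peak_char (arr : List (List Int)) (i j : Int)
    (hi0 : 0 ≤ i) (hi : i < (arr.length : Int)) (hj0 : 0 ≤ j) (hj : j < ((arr.headD []).length : Int)) :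
    is_peak i j arr = !pvNp arr (arr.length : Int) ((arr.headD []).length : Int) (i, j) := by
  have h4 : PySem.List.pyRange 0 4 1 = ([0, 1, 2, 3] : List Int) := by decide
  have e00 : PySem.List.pyGetD ([0, 0, -1, 1] : List Int) 0 0 = 0 := by decide
  have e01 : PySem.List.pyGetD ([0, 0, -1, 1] : List Int) 1 0 = 0 := by decide
  have e02 : PySem.List.pyGetD ([0, 0, -1, 1] : List Int) 2 0 = -1 := by decide
  have e03 : PySem.List.pyGetD ([0, 0, -1, 1] : List Int) 3 0 = 1 := by decide
  have e10 : PySem.List.pyGetD ([-1, 1, 0, 0] : List Int) 0 0 = -1 := by decide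
  have e11 : PySem.List.pyGetD ([-1, 1, 0, 0] : List Int) 1 0 = 1 := by decide
  have e12 : PySem.List.pyGetD ([-1, 1, 0, 0] : List Int) 2 0 = 0 := by decide
  have e13 : PySem.List.pyGetD ([-1, 1, 0, 0] : List Int) 3 0 = 0 := by decide
  have hneg : ∀ x : Int, x + -1 = x - 1 := fun x => by ring
  simp only [is_peak, h4, List.all_cons, List.all_nil, Bool.and_true,
    e00, e01, e02, e03, e10, e11, e12, e13, hneg, add_zero, gt_iff_lt]
  rw [Bool.eq_iff_iff]
  simp only [Bool.and_eq_true, Bool.not_eq_true', Bool.and_eq_false_iff,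
    decide_eq_false_iff_not, pvNp, not_and, not_or, not_lt]
  constructor
  · rintro ⟨h1, h2, h3, h4⟩
    refine ⟨fun hb => ?_, fun hb => ?_, fun hb => ?_, fun hb => ?_⟩
    · rcases h2 with h | h
      · exact absurd (h hi0 hi (by omega)) (by omega)
      · exact h
    · rcases h1 with h | h
      · exact absurd (h hi0 hi (by omega)) (by omega)
      · exact h
    · rcases h4 with h | h
      · exact absurd (h (by omega) (by omega) hj0) (by omega)
      · exact h
    · rcases h3 with h | h
      · exact absurd (h (by omega) (by omega) hj0) (by omega)
      · exact h
  · rintro ⟨h1, h2, h3, h4⟩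
    refine ⟨?_, ?_, ?_, ?_⟩
    · by_cases hb : 0 < j
      · exact Or.inr (h2 hb)
      · exact Or.inl (fun _ _ hc => absurd hc (by omega))
    · by_cases hb : j + 1 < ((arr.headD []).length : Int)
      · exact Or.inr (h1 hb)
      · exact Or.inl (fun _ _ _ => by omega)
    · by_cases hb : 0 < i
      · exact Or.inr (h4 hb)
      · exact Or.inl (fun hc => absurd hc (by omega))
    · by_cases hb : i + 1 < (arr.length : Int)
      · exact Or.inr (h3 hb)
      · exact Or.inl (fun _ hc => absurd hc (by omega))

def pvQH (arr : List (List Int)) (i j : Int) (y : Int × Int) : Prop :=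
  (pvIdx arr i j < pvIdx arr i (j + 1) ∧ y = (i, j)) ∨
  (¬ pvIdx arr i j < pvIdx arr i (j + 1) ∧ pvIdx arr i (j + 1) < pvIdx arr i j ∧ y = (i, j + 1))

def pvQV (arr : List (List Int)) (i j : Int) (y : Int × Int) : Prop :=
  (pvIdx arr i j < pvIdx arr (i + 1) j ∧ y = (i, j)) ∨
  (¬ pvIdx arr i j < pvIdx arr (i + 1) j ∧ pvIdx arr (i + 1) j < pvIdx arr i j ∧ y = (i + 1, j))

def pvGrid (arr : List (List Int)) : List (Int × Int) :=
  (PySem.List.pyRange 0 (arr.length : Int) 1) ×ˢ (PySem.List.pyRange 0 ((arr.headD []).length : Int) 1)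

def pvBad (arr : List (List Int)) : PySem.Set (Int × Int) :=
  (PySem.List.pyRange 0 ((arr.length : Int) - 1) 1).foldl (fun bad i =>
    (PySem.List.pyRange 0 ((arr.headD []).length : Int) 1).foldl (fun bad j =>
      if pvIdx arr i j < pvIdx arr (i + 1) j then PySem.Set.add bad (i, j)
      else if pvIdx arr (i + 1) j < pvIdx arr i j then PySem.Set.add bad (i + 1, j)
      else bad) bad)
    ((PySem.List.pyRange 0 (arr.length : Int) 1).foldl (fun bad i =>
      (PySem.List.pyRange 0 (((arr.headD []).length : Int) - 1) 1).foldl (fun bad j =>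
        if pvIdx arr i j < pvIdx arr i (j + 1) then PySem.Set.add bad (i, j)
        else if pvIdx arr i (j + 1) < pvIdx arr i j then PySem.Set.add bad (i, j + 1)
        else bad) bad) (PySem.Set.empty))

lemma pv_alt_eq (arr : List (List Int)) :
    solution_alt arr = (arr.length : Int) * ((arr.headD []).length : Int) - ((pvBad arr).length : Int) := rfl

lemma pv_mem_bad (arr : List (List Int)) (y : Int × Int) :
    y ∈ pvBad arr ↔ y ∈ pvGrid arr ∧ pvNp arr (arr.length : Int) ((arr.headD []).length : Int) y = true := by
  have hH : ∀ (i : Int) (s : PySem.Set (Int × Int)) (y : Int × Int),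
      y ∈ (PySem.List.pyRange 0 (((arr.headD []).length : Int) - 1) 1).foldl (fun bad j =>
        if pvIdx arr i j < pvIdx arr i (j + 1) then PySem.Set.add bad (i, j)
        else if pvIdx arr i (j + 1) < pvIdx arr i j then PySem.Set.add bad (i, j + 1)
        else bad) s ↔
      y ∈ s ∨ ∃ j ∈ PySem.List.pyRange 0 (((arr.headD []).length : Int) - 1) 1, pvQH arr i j y := by
    intro i
    apply pv_mem_foldl_step
    intro s j y
    split_ifs with h1 h2
    · simp only [PySem.Set.mem_add, pvQH, h1]
      tauto
    · simp only [PySem.Set.mem_add, pvQH, h1, h2]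
      tauto
    · simp only [pvQH, h1, h2]
      tauto
  have hV : ∀ (i : Int) (s : PySem.Set (Int × Int)) (y : Int × Int),
      y ∈ (PySem.List.pyRange 0 ((arr.headD []).length : Int) 1).foldl (fun bad j =>
        if pvIdx arr i j < pvIdx arr (i + 1) j then PySem.Set.add bad (i, j)
        else if pvIdx arr (i + 1) j < pvIdx arr i j then PySem.Set.add bad (i + 1, j)
        else bad) s ↔
      y ∈ s ∨ ∃ j ∈ PySem.List.pyRange 0 ((arr.headD []).length : Int) 1, pvQV arr i j y := by
    intro i
    apply pv_mem_foldl_step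
    intro s j y
    split_ifs with h1 h2
    · simp only [PySem.Set.mem_add, pvQV, h1]
      tauto
    · simp only [PySem.Set.mem_add, pvQV, h1, h2]
      tauto
    · simp only [pvQV, h1, h2]
      tauto
  unfold pvBad
  rw [pv_mem_foldl_step _ _ (fun s i y => hV i s y),
      pv_mem_foldl_step _ _ (fun s i y => hH i s y)]
  have hempty : y ∉ (PySem.Set.empty : PySem.Set (Int × Int)) := by simp [PySem.Set.empty]
  obtain ⟨a, b⟩ := y
  simp only [hempty, false_or]
  -- characterize the two edge-existentials as "in grid and disqualified"
  simp only [pvGrid, List.mem_product, PySem.List.mem_pyRange_one, pvQH, pvQV, pvNp,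
    decide_eq_true_iff, Prod.mk.injEq]
  constructor
  · rintro (⟨i, ⟨hi0, hiR⟩, j, ⟨hj0, hjC⟩, ⟨hv, rfl, rfl⟩ | ⟨hn, hv, rfl, rfl⟩⟩ |
            ⟨i, ⟨hi0, hiR⟩, j, ⟨hj0, hjC⟩, ⟨hv, rfl, rfl⟩ | ⟨hn, hv, rfl, rfl⟩⟩)
    · exact ⟨⟨⟨hi0, hiR⟩, by omega⟩, Or.inl ⟨by omega, hv⟩⟩
    · exact ⟨⟨⟨hi0, hiR⟩, by omega⟩, Or.inr (Or.inl ⟨by omega, by rwa [add_sub_cancel_right]⟩)⟩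
    · exact ⟨⟨⟨hi0, by omega⟩, ⟨hj0, hjC⟩⟩, Or.inr (Or.inr (Or.inl ⟨by omega, hv⟩))⟩
    · exact ⟨⟨⟨by omega, by omega⟩, ⟨hj0, hjC⟩⟩, Or.inr (Or.inr (Or.inr ⟨by omega, by rwa [add_sub_cancel_right]⟩))⟩
  · rintro ⟨⟨⟨ha0, haR⟩, hb0, hbC⟩, h1 | h2 | h3 | h4⟩
    · exact Or.inl ⟨a, ⟨ha0, haR⟩, b, ⟨hb0, by omega⟩, Or.inl ⟨h1.2, rfl, rfl⟩⟩
    · refine Or.inl ⟨a, ⟨ha0, haR⟩, b - 1, ⟨by omega, by omega⟩, Or.inr ?_⟩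
      rw [sub_add_cancel]
      exact ⟨not_lt.mpr (le_of_lt h2.2), h2.2, rfl, rfl⟩
    · exact Or.inr ⟨a, ⟨ha0, by omega⟩, b, ⟨hb0, hbC⟩, Or.inl ⟨h3.2, rfl, rfl⟩⟩
    · refine Or.inr ⟨a - 1, ⟨by omega, by omega⟩, b, ⟨hb0, hbC⟩, Or.inr ?_⟩
      rw [sub_add_cancel]
      exact ⟨not_lt.mpr (le_of_lt h4.2), h4.2, rfl, rfl⟩

lemma pv_nodup_bad (arr : List (List Int)) : (pvBad arr).Nodup := by
  unfold pvBad
  apply pv_nodup_foldl_step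
  · intro s i hs
    apply pv_nodup_foldl_step
    · intro s' j hs'
      split_ifs <;> first | exact PySem.Set.nodup_add _ _ hs' | exact hs'
    · exact hs
  · apply pv_nodup_foldl_step
    · intro s i hs
      apply pv_nodup_foldl_step
      · intro s' j hs'
        split_ifs <;> first | exact PySem.Set.nodup_add _ _ hs' | exact hs'
      · exact hs
    · exact List.nodup_nil

lemma pv_nodup_grid (arr : List (List Int)) : (pvGrid arr).Nodup :=
  (PySem.List.nodup_pyRange_one _ _).product (PySem.List.nodup_pyRange_one _ _)

theorem solution_eq_alt (arr : List (List Int)) : solution arr = solution_alt arr := by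
  have hA : solution arr =
      (((pvGrid arr).countP (fun p => is_peak p.1 p.2 arr) : Nat) : Int) := by
    simp only [solution, PySem.List.foldl_count_if, PySem.List.foldl_add, zero_add]
    rw [pv_sum_countP_product]
    rfl
  have hfilter : ((pvGrid arr).filter
      (pvNp arr (arr.length : Int) ((arr.headD []).length : Int))).length =
      (pvGrid arr).countP (pvNp arr (arr.length : Int) ((arr.headD []).length : Int)) :=
    List.countP_eq_length_filter.symm
  have hBlen : (pvBad arr).length =
      (pvGrid arr).countP (pvNp arr (arr.length : Int) ((arr.headD []).length : Int)) := by
    rw [← hfilter]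
    refine List.Perm.length_eq ?_
    rw [List.perm_ext_iff_of_nodup (pv_nodup_bad arr) ((pv_nodup_grid arr).filter _)]
    intro y
    rw [pv_mem_bad, List.mem_filter]
  have hcount : (pvGrid arr).countP (fun p => is_peak p.1 p.2 arr) =
      (pvGrid arr).countP
        (fun p => !(pvNp arr (arr.length : Int) ((arr.headD []).length : Int) p)) := by
    refine List.countP_congr ?_
    rintro ⟨a, b⟩ hp
    simp only [pvGrid, List.mem_product, PySem.List.mem_pyRange_one] at hp
    rw [pv_is_peak_char arr a b hp.1.1 hp.1.2 hp.2.1 hp.2.2]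
  have hsum := pv_countP_not (pvGrid arr)
    (pvNp arr (arr.length : Int) ((arr.headD []).length : Int))
  have hlen : (pvGrid arr).length = arr.length * (arr.headD []).length := by
    simp [pvGrid, List.length_product, PySem.List.length_pyRange_one]
  rw [hA, pv_alt_eq, hBlen, hcount]
  omega

-- ===== VERDICT (by name: the statement is the Claim_ definition above) =====
theorem solution_spec : Claim_equal_solution := by
  intro arr _ _
  unfold Spec_solution
  exact solution_eq_alt arr
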